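-- pv_equiv track=rewrite | github.com/MMXC/vibex | .stryker-tmp/sandbox-UgIHgu/tools/rca-tool/fix_patterns.py | yaml_to_regex
-- ===== SOURCE A (Python) =====
-- def yaml_to_regex(s):
--     """Convert YAML double-escaped regex to standard regex."""
--     if not s:
--         return s
--     result = []
--     i = 0
--     while i < len(s):
--         if i < len(s) - 1 and s[i] == '\\' and s[i+1] == '\\':
--             result.append('\\')
--             i += 2
--         elif i < len(s) - 1 and s[i] == '\\' and s[i+1] != '\\':
--             result.append(s[i])
--             result.append(s[i+1])
--             i += 2
--         else:
--             result.append(s[i])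
--             i += 1
--     return ''.join(result)
-- ===== SOURCE B (Python) =====
-- def yaml_to_regex(s):
--     """Convert YAML double-escaped regex to standard regex."""
--     if not s:
--         return s
--     return s.replace('\\\\', '\\')
-- ===== Notes on version B (the rewrite author's own statement) =====
-- stated objective: simpler
-- what changed: Replaced the explicit index-walking state machine (manual while loop, two-character lookahead, result list) with a single non-overlapping str.replace collapsing each literal backslash pair into one backslash.
import Mathlib
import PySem

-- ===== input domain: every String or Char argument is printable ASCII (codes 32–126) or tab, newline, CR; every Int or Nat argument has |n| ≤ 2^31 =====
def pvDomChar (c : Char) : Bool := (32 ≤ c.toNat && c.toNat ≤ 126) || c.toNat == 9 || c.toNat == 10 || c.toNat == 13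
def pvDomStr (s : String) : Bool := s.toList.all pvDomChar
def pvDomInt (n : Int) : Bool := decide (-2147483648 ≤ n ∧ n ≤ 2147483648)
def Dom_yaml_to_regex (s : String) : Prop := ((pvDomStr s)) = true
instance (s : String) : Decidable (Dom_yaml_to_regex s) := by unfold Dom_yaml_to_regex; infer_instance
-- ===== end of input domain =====

-- B collapses A's index-walking state machine into a single str.replace('\\\\','\\'): simpler, same behaviour.


-- ===== PORT A =====
-- A's while loop over index i, viewed on the remaining characters; `result` is the reversed accumulator.
def yamlLoopA : List Char → List Char → List Char
  | acc, c1 :: c2 :: rest =>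
      if c1 = '\\' ∧ c2 = '\\' then yamlLoopA ('\\' :: acc) rest            -- branch 1: i < len-1, pair of backslashes
      else if c1 = '\\' then yamlLoopA (c2 :: c1 :: acc) rest               -- branch 2: backslash + other, consume both
      else yamlLoopA (c1 :: acc) (c2 :: rest)                               -- else branch: consume one
  | acc, [c] => (c :: acc).reverse                                          -- else branch at the last character
  | acc, [] => acc.reverse                                                  -- loop exit, ''.join(result)

def yaml_to_regex (s : String) : String :=
  if s = "" then s else String.ofList (yamlLoopA [] s.toList)

-- ===== PORT B =====
def yaml_to_regex_alt (s : String) : String :=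
  if s = "" then s else PySem.Str.replace s "\\\\" "\\"

-- ===== PRECONDITION & SPEC =====
def Spec_yaml_to_regex (s : String) (out : String) : Prop := out = yaml_to_regex_alt s
instance (s : String) (out : String) : Decidable (Spec_yaml_to_regex s out) := by unfold Spec_yaml_to_regex; infer_instance

-- ===== CLAIM (what is proved, stated in full; the proofs are below) =====
def Claim_equal_yaml_to_regex : Prop := ∀ (s : String), Dom_yaml_to_regex s → Spec_yaml_to_regex s (yaml_to_regex s)

-- ===== LEMMAS AND PROOFS =====

-- pure (accumulator-free) form of the collapse
def yamlF : List Char → List Char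
  | c1 :: c2 :: rest =>
      if c1 = '\\' then (if c2 = '\\' then '\\' :: yamlF rest else c1 :: c2 :: yamlF rest)
      else c1 :: yamlF (c2 :: rest)
  | l => l

theorem yamlF_cons_ne (c : Char) (t : List Char) (h : c ≠ '\\') : yamlF (c :: t) = c :: yamlF t := by
  cases t with
  | nil => simp [yamlF]
  | cons c2 r => simp [yamlF, h]

theorem yamlLoopA_eq (acc l : List Char) : yamlLoopA acc l = acc.reverse ++ yamlF l := by
  induction acc, l using yamlLoopA.induct with
  | case1 acc c1 c2 rest h ih =>
      obtain ⟨h1, h2⟩ := h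
      subst h1; subst h2
      simp [yamlLoopA, yamlF, ih]
  | case2 acc c2 rest h ih =>
      have hc2 : c2 ≠ '\\' := fun he => h ⟨rfl, he⟩
      simp [yamlLoopA, yamlF, hc2, ih]
  | case3 acc c1 c2 rest h h1 ih =>
      simp [yamlLoopA, h1, yamlF_cons_ne c1 _ h1, ih]
  | case4 acc c => simp [yamlLoopA, yamlF]
  | case5 acc => simp [yamlLoopA, yamlF]

theorem go_eq (fuel : Nat) (l acc : List Char) (h : l.length ≤ fuel) :
    PySem.Chars.replace.go ['\\', '\\'] ['\\'] fuel l acc = acc.reverse ++ yamlF l := by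
  induction fuel generalizing l acc with
  | zero =>
      have : l = [] := by cases l <;> simp_all
      subst this
      simp [PySem.Chars.replace.go, yamlF]
  | succ n ih =>
      cases l with
      | nil => simp [PySem.Chars.replace.go, yamlF]
      | cons c t =>
          rw [PySem.Chars.replace.go]
          by_cases hp : List.isPrefixOf ['\\', '\\'] (c :: t) = true
          · cases t with
            | nil => simp [List.isPrefixOf] at hp
            | cons c2 r =>
                obtain ⟨h1, h2⟩ := by simpa [List.isPrefixOf] using hp
                subst h1; subst h2
                have hr : r.length ≤ n := by
                  simp only [List.length_cons] at h; omega
                simp only [hp, if_true]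
                rw [show List.drop (['\\', '\\'] : List Char).length ('\\' :: '\\' :: r) = r from rfl]
                rw [ih r _ hr]
                simp [yamlF]
          · have ht : t.length ≤ n := by
              simp only [List.length_cons] at h; omega
            have hstep : yamlF (c :: t) = c :: yamlF t := by
              by_cases hc : c = '\\'
              · subst hc
                cases t with
                | nil => simp [yamlF]
                | cons c2 r =>
                    have hc2 : c2 ≠ '\\' := by
                      intro he; subst he; simp [List.isPrefixOf] at hp
                    simp [yamlF, hc2, yamlF_cons_ne c2 r hc2]
              · exact yamlF_cons_ne c t hc
            simp only [hp]
            rw [ih t (c :: acc) ht, hstep]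
            simp

theorem replace_eq_yamlF (l : List Char) :
    PySem.Chars.replace l ['\\', '\\'] ['\\'] = yamlF l := by
  rw [PySem.Chars.replace]
  simp only [List.isEmpty]
  simpa using go_eq l.length l [] le_rfl

-- ===== VERDICT (by name: the statement is the Claim_ definition above) =====
theorem yaml_to_regex_spec : Claim_equal_yaml_to_regex := by
  intro s _
  unfold Spec_yaml_to_regex yaml_to_regex yaml_to_regex_alt
  by_cases hs : s = ""
  · simp [hs]
  · simp only [hs, if_false]
    apply String.toList_injective
    rw [PySem.Str.toList_replace]
    have : ("\\\\" : String).toList = ['\\', '\\'] := rfl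
    rw [this]
    have : ("\\" : String).toList = ['\\'] := rfl
    rw [this, replace_eq_yamlF]
    simp [yamlLoopA_eq]
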